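-- pv_equiv track=rewrite | github.com/ilyindanny/python_study | files/Seminars Slavalk/seminar 005/game X-0 bot.py | set_map
-- ===== SOURCE A (Python) =====
-- def set_map(n: int) -> set:
--
--     my_map = []
--
--     for i in range(n + n + 2):
--         my_map.append([0] * n)
--
--     l = 1
--     for i in range(n):
--         for j in range(n):
--             my_map[i][j] = l
--             l += 1
--     l = 1
--     for i in range(n):
--         for j in range(n, n + n):
--             my_map[j][i] = l
--             l += 1
--     l = 1
--     for i in range(n):
--         for j in range(n + n, n + n + 1):
--             my_map[j][i] = l
--             l += n + 1
--     l = n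
--     for i in range(n):
--         for j in range(n + n + 1, n + n + 2):
--             my_map[j][i] = l
--             l += n - 1
--
--
--     for i in range(len(my_map)):
--         my_map[i] = set(my_map[i])
--
--     return my_map
-- ===== SOURCE B (Python) =====
-- def set_map(n: int) -> set:
--     # one pass over the output index r, classifying it into bands and
--     # computing each line by closed-form index arithmetic
--     def line(r):
--         if r < n:
--             return {r * n + j + 1 for j in range(n)}
--         if r < n + n:
--             return {(r - n) + k * n + 1 for k in range(n)}
--         if r == n + n:
--             return {i * (n + 1) + 1 for i in range(n)}
--         return {n + i * (n - 1) for i in range(n)}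
--     return [line(r) for r in range(n + n + 2)]
-- ===== Notes on version B (the rewrite author's own statement) =====
-- stated objective: simpler
-- what changed: Replaces the preallocated (2n+2) x n integer buffer, four separate mutation passes with running counters l, and a final set() conversion pass by a single pass over the output index r that classifies r into four bands (row, column, main diagonal, anti-diagonal) and builds each line directly by closed-form index arithmetic.
import Mathlib
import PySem

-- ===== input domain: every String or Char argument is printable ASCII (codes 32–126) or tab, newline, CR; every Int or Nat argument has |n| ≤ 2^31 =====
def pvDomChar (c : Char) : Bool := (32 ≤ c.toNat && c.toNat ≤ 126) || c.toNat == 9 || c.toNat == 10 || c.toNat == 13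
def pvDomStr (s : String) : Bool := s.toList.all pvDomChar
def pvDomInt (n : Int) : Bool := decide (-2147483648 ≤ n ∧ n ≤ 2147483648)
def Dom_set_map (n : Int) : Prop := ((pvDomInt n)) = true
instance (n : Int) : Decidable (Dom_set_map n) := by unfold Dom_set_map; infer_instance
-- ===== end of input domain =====

-- B replaces A's preallocated (2n+2)×n buffer, four mutation passes with running
-- counters and a final set() pass by one pass over the output index r, classifying
-- r into four bands and building each line by closed-form index arithmetic (simpler).

-- ===== PORT A =====
-- my_map[i][j] = v for the nonnegative in-range indices A's loops produce; exact there
def pySetIJ (m : List (List Int)) (i j : Int) (v : Int) : List (List Int) :=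
  m.modify i.toNat (fun row => row.set j.toNat v)

def set_map (n : Int) : List (List Int) :=
  -- my_map = []; for i in range(n+n+2): my_map.append([0]*n)
  let myMap0 : List (List Int) :=
    (PySem.List.pyRange 0 (n + n + 2) 1).foldl
      (fun acc _ => acc ++ [List.replicate n.toNat (0 : Int)]) []
  -- l = 1; for i in range(n): for j in range(n): my_map[i][j] = l; l += 1
  let st1 := (PySem.List.pyRange 0 n 1).foldl (fun st i =>
      (PySem.List.pyRange 0 n 1).foldl
        (fun (st : List (List Int) × Int) j => (pySetIJ st.1 i j st.2, st.2 + 1)) st)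
    (myMap0, 1)
  -- l = 1; for i in range(n): for j in range(n, n+n): my_map[j][i] = l; l += 1
  let st2 := (PySem.List.pyRange 0 n 1).foldl (fun st i =>
      (PySem.List.pyRange n (n + n) 1).foldl
        (fun (st : List (List Int) × Int) j => (pySetIJ st.1 j i st.2, st.2 + 1)) st)
    (st1.1, 1)
  -- l = 1; for i in range(n): for j in range(n+n, n+n+1): my_map[j][i] = l; l += n+1
  let st3 := (PySem.List.pyRange 0 n 1).foldl (fun st i =>
      (PySem.List.pyRange (n + n) (n + n + 1) 1).foldl
        (fun (st : List (List Int) × Int) j => (pySetIJ st.1 j i st.2, st.2 + (n + 1))) st)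
    (st2.1, 1)
  -- l = n; for i in range(n): for j in range(n+n+1, n+n+2): my_map[j][i] = l; l += n-1
  let st4 := (PySem.List.pyRange 0 n 1).foldl (fun st i =>
      (PySem.List.pyRange (n + n + 1) (n + n + 2) 1).foldl
        (fun (st : List (List Int) × Int) j => (pySetIJ st.1 j i st.2, st.2 + (n - 1))) st)
    (st3.1, n)
  -- for i in range(len(my_map)): my_map[i] = set(my_map[i])
  st4.1.map PySem.Set.ofList

-- ===== PORT B =====
def lineOf (n r : Int) : List Int :=
  if r < n then
    PySem.Set.ofList ((PySem.List.pyRange 0 n 1).map (fun j => r * n + j + 1))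
  else if r < n + n then
    PySem.Set.ofList ((PySem.List.pyRange 0 n 1).map (fun k => (r - n) + k * n + 1))
  else if r = n + n then
    PySem.Set.ofList ((PySem.List.pyRange 0 n 1).map (fun i => i * (n + 1) + 1))
  else
    PySem.Set.ofList ((PySem.List.pyRange 0 n 1).map (fun i => n + i * (n - 1)))

def set_map_alt (n : Int) : List (List Int) :=
  (PySem.List.pyRange 0 (n + n + 2) 1).map (lineOf n)

-- ===== PRECONDITION & SPEC =====
def Spec_set_map (n : Int) (out : List (List Int)) : Prop := out = set_map_alt n
instance (n : Int) (out : List (List Int)) : Decidable (Spec_set_map n out) := by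
  unfold Spec_set_map; infer_instance

-- ===== CLAIM (what is proved, stated in full; the proofs are below) =====
def Claim_equal_set_map : Prop := ∀ (n : Int), Dom_set_map n → Spec_set_map n (set_map n)

-- ===== LEMMAS AND PROOFS =====

/-- The (R × C)-matrix whose entry at (r, c) is `g r c`. -/
def matmk (g : Nat → Nat → Int) (R C : Nat) : List (List Int) :=
  (List.range R).map (fun r => (List.range C).map (fun c => g r c))

theorem matmk_congr {g g' : Nat → Nat → Int} {R C : Nat}
    (h : ∀ r < R, ∀ c < C, g r c = g' r c) : matmk g R C = matmk g' R C := by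
  unfold matmk
  refine List.map_congr_left (fun r hr => ?_)
  refine List.map_congr_left (fun c hc => ?_)
  exact h r (List.mem_range.mp hr) c (List.mem_range.mp hc)

theorem setIJ_matmk (g : Nat → Nat → Int) (R C : Nat) (i j : Nat) (v : Int) :
    pySetIJ (matmk g R C) (i : Int) (j : Int) v
      = matmk (fun r c => if r = i ∧ c = j then v else g r c) R C := by
  unfold pySetIJ matmk
  apply List.ext_getElem
  · simp
  · intro r h1 h2
    simp only [List.getElem_modify, List.getElem_map, List.getElem_range, Int.toNat_natCast]
    by_cases hri : i = r
    · subst hri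
      apply List.ext_getElem
      · simp
      · intro c hc1 hc2
        simp only [List.getElem_map, List.getElem_range]
        by_cases hcj : j = c <;> simp [hcj] <;> omega
    · simp only [if_neg hri]
      refine List.map_congr_left (fun c _ => ?_)
      rw [if_neg]
      omega

theorem foldl_append_const {α : Type} (y : List Int) :
    ∀ (l : List α) (acc : List (List Int)),
      l.foldl (fun acc _ => acc ++ [y]) acc = acc ++ List.replicate l.length y := by
  intro l
  induction l with
  | nil => simp
  | cons x xs ih => intro acc; simp [ih, List.replicate_succ]

theorem replicate_matmk (R C : Nat) :
    List.replicate R (List.replicate C (0 : Int)) = matmk (fun _ _ => 0) R C := by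
  apply List.ext_getElem <;> simp [matmk]

theorem pyR0 (t : Int) :
    PySem.List.pyRange 0 t 1 = (List.range t.toNat).map (Nat.cast : Nat → Int) := by
  rw [PySem.List.pyRange_one]
  simp only [sub_zero]
  exact List.map_congr_left (fun k _ => by omega)

-- loop 1, inner pass: writes row i at columns 0..K-1 with l, l+1, …
theorem inner1 (R C : Nat) (i : Nat) (g : Nat → Nat → Int) (l : Int) (K : Nat) :
    List.foldl
      (fun (st : List (List Int) × Int) j => (pySetIJ st.1 (i : Int) j st.2, st.2 + 1))
      (matmk g R C, l) ((List.range K).map (Nat.cast : Nat → Int))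
    = (matmk (fun r c => if r = i ∧ c < K then l + c else g r c) R C, l + K) := by
  induction K with
  | zero =>
    simp only [List.range_zero, List.map_nil, List.foldl_nil, Prod.mk.injEq]
    exact ⟨matmk_congr (fun r _ c _ => (if_neg (by omega)).symm), by push_cast; ring⟩
  | succ K ih =>
    rw [List.range_succ, List.map_append, List.foldl_append, ih]
    simp only [List.map_cons, List.map_nil, List.foldl_cons, List.foldl_nil]
    rw [setIJ_matmk]
    simp only [Prod.mk.injEq]
    constructor
    · apply matmk_congr
      intro r _ c _
      split_ifs with h1 h2 h2 <;>
        first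
          | rfl
          | (push_cast; omega)
          | (exfalso; omega)
    · push_cast; ring

-- loop 1, outer pass: rows 0..K-1 become 1+r*m, …, r*m+m
theorem outer1 (m R : Nat) (g : Nat → Nat → Int) (K : Nat) :
    List.foldl
      (fun st i =>
        List.foldl
          (fun (st : List (List Int) × Int) j => (pySetIJ st.1 i j st.2, st.2 + 1)) st
          ((List.range m).map (Nat.cast : Nat → Int)))
      (matmk g R m, 1) ((List.range K).map (Nat.cast : Nat → Int))
    = (matmk (fun r c => if r < K ∧ c < m then (r : Int) * m + c + 1 else g r c) R m,
       1 + (K : Int) * m) := by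
  induction K with
  | zero =>
    simp only [List.range_zero, List.map_nil, List.foldl_nil, Prod.mk.injEq]
    exact ⟨matmk_congr (fun r _ c _ => (if_neg (by omega)).symm), by push_cast; ring⟩
  | succ K ih =>
    rw [List.range_succ, List.map_append, List.foldl_append, ih]
    simp only [List.map_cons, List.map_nil, List.foldl_cons, List.foldl_nil]
    rw [inner1]
    simp only [Prod.mk.injEq]
    constructor
    · apply matmk_congr
      intro r hr c hc
      split_ifs with h1 h2 h2 <;>
        first
          | rfl
          | (exfalso; omega)
          | (push_cast; omega)
          | (obtain ⟨rfl, -⟩ := h1; push_cast; ring)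
    · push_cast; ring

-- loop 2, inner pass: writes column i at rows m..m+K-1 with l, l+1, …
theorem inner2 (m R : Nat) (i : Nat) (g : Nat → Nat → Int) (l : Int) (K : Nat) :
    List.foldl
      (fun (st : List (List Int) × Int) j => (pySetIJ st.1 j (i : Int) st.2, st.2 + 1))
      (matmk g R m, l) ((List.range K).map (fun (k : Nat) => ((m : Int) + (k : Int))))
    = (matmk (fun r c => if m ≤ r ∧ r < m + K ∧ c = i then l + ((r : Int) - m) else g r c) R m,
       l + K) := by
  induction K with
  | zero =>
    simp only [List.range_zero, List.map_nil, List.foldl_nil, Prod.mk.injEq]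
    exact ⟨matmk_congr (fun r _ c _ => (if_neg (by omega)).symm), by push_cast; ring⟩
  | succ K ih =>
    rw [List.range_succ, List.map_append, List.foldl_append, ih]
    simp only [List.map_cons, List.map_nil, List.foldl_cons, List.foldl_nil]
    have hmk : ((m : Int) + K) = ((m + K : Nat) : Int) := by push_cast; ring
    rw [hmk, setIJ_matmk]
    simp only [Prod.mk.injEq]
    constructor
    · apply matmk_congr
      intro r hr c hc
      split_ifs with h1 h2 h2 <;>
        first
          | rfl
          | (exfalso; omega)
          | (push_cast; omega)
          | (obtain ⟨rfl, rfl⟩ := h1; push_cast; ring)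
    · push_cast; ring

-- loop 2, outer pass
theorem outer2 (m R : Nat) (g : Nat → Nat → Int) (K : Nat) :
    List.foldl
      (fun st i =>
        List.foldl
          (fun (st : List (List Int) × Int) j => (pySetIJ st.1 j i st.2, st.2 + 1)) st
          ((List.range m).map (fun (k : Nat) => ((m : Int) + (k : Int)))))
      (matmk g R m, 1) ((List.range K).map (Nat.cast : Nat → Int))
    = (matmk (fun r c =>
          if m ≤ r ∧ r < m + m ∧ c < K then 1 + (c : Int) * m + ((r : Int) - m) else g r c) R m,
       1 + (K : Int) * m) := by
  induction K with
  | zero =>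
    simp only [List.range_zero, List.map_nil, List.foldl_nil, Prod.mk.injEq]
    exact ⟨matmk_congr (fun r _ c _ => (if_neg (by omega)).symm), by push_cast; ring⟩
  | succ K ih =>
    rw [List.range_succ, List.map_append, List.foldl_append, ih]
    simp only [List.map_cons, List.map_nil, List.foldl_cons, List.foldl_nil]
    rw [inner2]
    simp only [Prod.mk.injEq]
    constructor
    · apply matmk_congr
      intro r hr c hc
      split_ifs with h1 h2 h2 <;>
        first
          | rfl
          | (exfalso; omega)
          | (push_cast; omega)
          | (obtain ⟨-, -, rfl⟩ := h1; push_cast; ring)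
    · push_cast; ring

-- loop 3: single write per i at row m+m, value 1 + c*(m+1)
theorem outer3 (m R : Nat) (g : Nat → Nat → Int) (K : Nat) :
    List.foldl
      (fun st i =>
        List.foldl
          (fun (st : List (List Int) × Int) j =>
            (pySetIJ st.1 j i st.2, st.2 + ((m : Int) + 1))) st
          [((m + m : Nat) : Int)])
      (matmk g R m, 1) ((List.range K).map (Nat.cast : Nat → Int))
    = (matmk (fun r c => if r = m + m ∧ c < K then 1 + (c : Int) * ((m : Int) + 1) else g r c) R m,
       1 + (K : Int) * ((m : Int) + 1)) := by
  induction K with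
  | zero =>
    simp only [List.range_zero, List.map_nil, List.foldl_nil, Prod.mk.injEq]
    exact ⟨matmk_congr (fun r _ c _ => (if_neg (by omega)).symm), by push_cast; ring⟩
  | succ K ih =>
    rw [List.range_succ, List.map_append, List.foldl_append, ih]
    simp only [List.map_cons, List.map_nil, List.foldl_cons, List.foldl_nil]
    rw [setIJ_matmk]
    simp only [Prod.mk.injEq]
    constructor
    · apply matmk_congr
      intro r hr c hc
      split_ifs with h1 h2 h2 <;>
        first
          | rfl
          | (exfalso; omega)
          | (push_cast; omega)
          | (obtain ⟨rfl, rfl⟩ := h1; push_cast; ring)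
    · push_cast; ring

-- loop 4: single write per i at row m+m+1, value m + c*(m-1)
theorem outer4 (m R : Nat) (g : Nat → Nat → Int) (K : Nat) :
    List.foldl
      (fun st i =>
        List.foldl
          (fun (st : List (List Int) × Int) j =>
            (pySetIJ st.1 j i st.2, st.2 + ((m : Int) - 1))) st
          [((m + m + 1 : Nat) : Int)])
      (matmk g R m, (m : Int)) ((List.range K).map (Nat.cast : Nat → Int))
    = (matmk (fun r c =>
          if r = m + m + 1 ∧ c < K then (m : Int) + (c : Int) * ((m : Int) - 1) else g r c) R m,
       (m : Int) + (K : Int) * ((m : Int) - 1)) := by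
  induction K with
  | zero =>
    simp only [List.range_zero, List.map_nil, List.foldl_nil, Prod.mk.injEq]
    exact ⟨matmk_congr (fun r _ c _ => (if_neg (by omega)).symm), by push_cast; ring⟩
  | succ K ih =>
    rw [List.range_succ, List.map_append, List.foldl_append, ih]
    simp only [List.map_cons, List.map_nil, List.foldl_cons, List.foldl_nil]
    rw [setIJ_matmk]
    simp only [Prod.mk.injEq]
    constructor
    · apply matmk_congr
      intro r hr c hc
      split_ifs with h1 h2 h2 <;>
        first
          | rfl
          | (exfalso; omega)
          | (push_cast; omega)
          | (obtain ⟨rfl, rfl⟩ := h1; push_cast; ring)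
    · push_cast; ring

-- the full nonnegative case
theorem set_map_eq_alt_nonneg (m : Nat) : set_map (m : Nat) = set_map_alt (m : Nat) := by
  have eR : PySem.List.pyRange 0 ((m : Int) + m + 2) 1
      = (List.range (m + m + 2)).map (Nat.cast : Nat → Int) := by
    have e2 : ((m : Int) + m + 2) = ((m + m + 2 : Nat) : Int) := by push_cast; ring
    rw [e2, pyR0, Int.toNat_natCast]
  have e0 : PySem.List.pyRange 0 (m : Int) 1
      = (List.range m).map (Nat.cast : Nat → Int) := by
    rw [pyR0, Int.toNat_natCast]
  have emid : PySem.List.pyRange (m : Int) ((m : Int) + m) 1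
      = (List.range m).map (fun (k : Nat) => ((m : Int) + (k : Int))) := by
    rw [PySem.List.pyRange_one]
    have ht2 : ((m : Int) + m - m).toNat = m := by omega
    rw [ht2]
  have es3 : PySem.List.pyRange ((m : Int) + m) ((m : Int) + m + 1) 1
      = [((m + m : Nat) : Int)] := by
    rw [PySem.List.pyRange_one_singleton]
    simp only [List.cons.injEq, and_true]
    push_cast; ring
  have es4 : PySem.List.pyRange ((m : Int) + m + 1) ((m : Int) + m + 2) 1
      = [((m + m + 1 : Nat) : Int)] := by
    have : ((m : Int) + m + 2) = ((m : Int) + m + 1) + 1 := by ring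
    rw [this, PySem.List.pyRange_one_singleton]
    simp only [List.cons.injEq, and_true]
    push_cast; ring
  simp only [set_map, set_map_alt, eR, e0, emid, es3, es4, foldl_append_const,
    List.nil_append, List.length_map, List.length_range, Int.toNat_natCast,
    replicate_matmk, outer1, outer2, outer3, outer4]
  unfold matmk
  rw [List.map_map, List.map_map]
  refine List.map_congr_left (fun r hr => ?_)
  have hr' : r < m + m + 2 := List.mem_range.mp hr
  simp only [Function.comp]
  by_cases h1 : r < m
  · simp only [lineOf, if_pos (show ((r : Nat) : Int) < (m : Int) by omega)]
    rw [e0, List.map_map]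
    refine congrArg _ (List.map_congr_left (fun c hc => ?_))
    have hc' : c < m := List.mem_range.mp hc
    simp only [Function.comp]
    split_ifs <;> first | (exfalso; omega) | (push_cast; ring)
  · by_cases h2 : r < m + m
    · simp only [lineOf, if_neg (show ¬ ((r : Nat) : Int) < (m : Int) by omega),
        if_pos (show ((r : Nat) : Int) < (m : Int) + m by omega)]
      rw [e0, List.map_map]
      refine congrArg _ (List.map_congr_left (fun c hc => ?_))
      have hc' : c < m := List.mem_range.mp hc
      simp only [Function.comp]
      split_ifs <;> first | (exfalso; omega) | (push_cast; ring)
    · by_cases h3 : r = m + m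
      · simp only [lineOf, if_neg (show ¬ ((r : Nat) : Int) < (m : Int) by omega),
          if_neg (show ¬ ((r : Nat) : Int) < (m : Int) + m by omega),
          if_pos (show ((r : Nat) : Int) = (m : Int) + m by omega)]
        rw [e0, List.map_map]
        refine congrArg _ (List.map_congr_left (fun c hc => ?_))
        have hc' : c < m := List.mem_range.mp hc
        simp only [Function.comp]
        split_ifs <;> first | (exfalso; omega) | (push_cast; ring)
      · have h4 : r = m + m + 1 := by omega
        simp only [lineOf, if_neg (show ¬ ((r : Nat) : Int) < (m : Int) by omega),
          if_neg (show ¬ ((r : Nat) : Int) < (m : Int) + m by omega),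
          if_neg (show ¬ ((r : Nat) : Int) = (m : Int) + m by omega)]
        rw [e0, List.map_map]
        refine congrArg _ (List.map_congr_left (fun c hc => ?_))
        have hc' : c < m := List.mem_range.mp hc
        simp only [Function.comp]
        split_ifs <;> first | rfl | (exfalso; omega) | (push_cast; ring)

-- ===== VERDICT (by name: the statement is the Claim_ definition above) =====
theorem set_map_spec : Claim_equal_set_map := by
  intro n _
  unfold Spec_set_map
  by_cases hn : 0 ≤ n
  · obtain ⟨m, rfl⟩ := Int.eq_ofNat_of_zero_le hn
    exact set_map_eq_alt_nonneg m
  · have h1 : PySem.List.pyRange 0 (n + n + 2) 1 = [] :=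
      PySem.List.pyRange_one_eq_nil (by omega)
    have h2 : PySem.List.pyRange 0 n 1 = [] :=
      PySem.List.pyRange_one_eq_nil (by omega)
    simp [set_map, set_map_alt, h1, h2]
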